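-- pv_equiv track=rewrite | github.com/mike0615/lrn_tools | tools/freeipa/ipa-user-report.py | parse_ipa_output
-- ===== SOURCE A (Python) =====
-- def parse_ipa_output(text):
--     """Parse `ipa user-find --all` multi-record output into list of dicts."""
--     records = []
--     current = {}
--     for line in text.splitlines():
--         if line.startswith('---'):
--             if current:
--                 records.append(current)
--             current = {}
--             continue
--         if ':' in line and not line.startswith(' '):
--             key, _, val = line.partition(':')
--             current[key.strip()] = val.strip()
--         elif line.startswith('  ') and records or current:
--             # Continuation value
--             pass
--     if current:
--         records.append(current)
--     return records
-- ===== SOURCE B (Python) =====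
-- def parse_ipa_output(text):
--     """Two-pass: split lines into '---'-delimited blocks, then map each block to a dict."""
--     blocks, cur = [], []
--     for line in text.splitlines():
--         if line.startswith('---'):
--             blocks.append(cur)
--             cur = []
--         else:
--             cur.append(line)
--     blocks.append(cur)
--     records = []
--     for block in blocks:
--         d = {}
--         for line in block:
--             if ':' in line and not line.startswith(' '):
--                 key, _, val = line.partition(':')
--                 d[key.strip()] = val.strip()
--         if d:
--             records.append(d)
--     return records
-- ===== Notes on version B (the rewrite author's own statement) =====
-- stated objective: alternative
-- what changed: Replaced A's single flat state machine holding (records, current-dict) with a two-pass segment-then-map decomposition: pass 1 splits the lines into blocks at the dashed separator lines, pass 2 maps each block to a dict and keeps the non-empty ones.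
import Mathlib
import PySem

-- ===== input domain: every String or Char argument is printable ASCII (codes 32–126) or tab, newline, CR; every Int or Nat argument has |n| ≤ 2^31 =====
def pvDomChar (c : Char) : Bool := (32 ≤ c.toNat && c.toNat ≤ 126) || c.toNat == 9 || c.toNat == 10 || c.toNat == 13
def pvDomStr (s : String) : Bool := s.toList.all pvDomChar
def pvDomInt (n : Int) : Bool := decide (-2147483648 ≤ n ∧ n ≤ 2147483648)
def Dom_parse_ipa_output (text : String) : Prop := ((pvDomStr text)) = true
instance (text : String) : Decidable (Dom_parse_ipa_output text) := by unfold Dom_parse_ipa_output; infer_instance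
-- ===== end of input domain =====

-- B replaces A's flat (records, current) state machine by a two-pass segment-then-map
-- decomposition (split lines into '---'-delimited blocks, then each block to a dict);
-- objective: alternative decomposition, same cost.

-- shared line-level primitive: `key, _, val = line.partition(':')` (first ':'), exact
-- hand port of str.partition for the single-char separator ':' (PySem has no partition)
def pvPartitionColon (line : String) : String × String :=
  (String.ofList (line.toList.takeWhile (fun c => c ≠ ':')),
   String.ofList ((line.toList.dropWhile (fun c => c ≠ ':')).drop 1))

-- shared line-level primitive: `if ':' in line and not line.startswith(' '): d[key.strip()] = val.strip()`
def pvAddLine (d : PySem.Dict String String) (line : String) : PySem.Dict String String :=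
  if PySem.Str.isIn ":" line && !(PySem.Str.startswith line " ") then
    d.insert (PySem.Str.strip (pvPartitionColon line).1) (PySem.Str.strip (pvPartitionColon line).2)
  else d

-- ===== PORT A =====
-- A's flat loop: state (records, current); '---' flushes current if non-empty; the
-- elif branch of A is `pass`, so non-key lines leave the state unchanged.
def pvStepA (st : List (PySem.Dict String String) × PySem.Dict String String) (line : String) :
    List (PySem.Dict String String) × PySem.Dict String String :=
  if PySem.Str.startswith line "---" then
    (if st.2.items.isEmpty then st.1 else st.1 ++ [st.2], PySem.Dict.empty)
  else (st.1, pvAddLine st.2 line)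

def parse_ipa_output (text : String) : List (List (String × String)) :=
  let r := (PySem.Str.splitlines text).foldl pvStepA ([], PySem.Dict.empty)
  let records := if r.2.items.isEmpty then r.1 else r.1 ++ [r.2]
  records.map PySem.Dict.items

-- ===== PORT B =====
-- pass 1 of Source B: split the lines into blocks at '---' lines
def pvStepB (st : List (List String) × List String) (line : String) :
    List (List String) × List String :=
  if PySem.Str.startswith line "---" then (st.1 ++ [st.2], []) else (st.1, st.2 ++ [line])

-- pass 2 of Source B: one block to one dict
def pvBlockDict (b : List String) : PySem.Dict String String :=
  b.foldl pvAddLine PySem.Dict.empty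

def parse_ipa_output_alt (text : String) : List (List (String × String)) :=
  let p := (PySem.Str.splitlines text).foldl pvStepB ([], [])
  let blocks := p.1 ++ [p.2]
  (((blocks.map pvBlockDict).filter (fun d => !d.items.isEmpty)).map PySem.Dict.items)

-- ===== PRECONDITION & SPEC =====
def Spec_parse_ipa_output (text : String) (out : List (List (String × String))) : Prop := out = parse_ipa_output_alt text
instance (text : String) (out : List (List (String × String))) : Decidable (Spec_parse_ipa_output text out) := by unfold Spec_parse_ipa_output; infer_instance

-- ===== CLAIM (what is proved, stated in full; the proofs are below) =====
def Claim_equal_parse_ipa_output : Prop := ∀ (text : String), Dom_parse_ipa_output text → Spec_parse_ipa_output text (parse_ipa_output text)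


-- ===== LEMMAS AND PROOFS =====

-- abstract block-dict sequence both sides compute
def pvDicts (cur : PySem.Dict String String) : List String → List (PySem.Dict String String)
  | [] => [cur]
  | l :: ls =>
    if PySem.Str.startswith l "---" then cur :: pvDicts PySem.Dict.empty ls
    else pvDicts (pvAddLine cur l) ls

theorem pvLemA (ls : List String) (recs : List (PySem.Dict String String))
    (cur : PySem.Dict String String) :
    (if (ls.foldl pvStepA (recs, cur)).2.items.isEmpty then (ls.foldl pvStepA (recs, cur)).1
     else (ls.foldl pvStepA (recs, cur)).1 ++ [(ls.foldl pvStepA (recs, cur)).2])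
    = recs ++ (pvDicts cur ls).filter (fun d => !d.items.isEmpty) := by
  induction ls generalizing recs cur with
  | nil =>
    simp only [List.foldl_nil, pvDicts, List.filter_cons, List.filter_nil]
    by_cases h : cur.items.isEmpty <;> simp [h]
  | cons l ls ih =>
    simp only [List.foldl_cons, pvStepA, pvDicts]
    by_cases hd : PySem.Str.startswith l "---"
    · simp only [hd, if_true]
      by_cases h : cur.items.isEmpty
      · simp only [h, if_true]
        rw [ih]
        simp [h]
      · simp only [h, Bool.false_eq_true, if_false]
        rw [ih]
        simp [h, List.append_assoc]
    · simp only [hd, Bool.false_eq_true, if_false]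
      exact ih recs (pvAddLine cur l)

theorem pvLemB (ls : List String) (bs : List (List String)) (curL : List String) :
    ((ls.foldl pvStepB (bs, curL)).1 ++ [(ls.foldl pvStepB (bs, curL)).2]).map pvBlockDict
    = bs.map pvBlockDict ++ pvDicts (pvBlockDict curL) ls := by
  induction ls generalizing bs curL with
  | nil => simp [pvDicts]
  | cons l ls ih =>
    simp only [List.foldl_cons, pvStepB, pvDicts]
    by_cases hd : PySem.Str.startswith l "---"
    · simp only [hd, if_true]
      rw [ih]
      simp [pvBlockDict, List.append_assoc]
    · have hstep : pvBlockDict (curL ++ [l]) = pvAddLine (pvBlockDict curL) l := by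
        simp [pvBlockDict, List.foldl_append]
      simp only [hd, Bool.false_eq_true, if_false]
      rw [ih, hstep]

-- ===== VERDICT (by name: the statement is the Claim_ definition above) =====
theorem parse_ipa_output_spec : Claim_equal_parse_ipa_output := by
  intro text _
  unfold Spec_parse_ipa_output parse_ipa_output parse_ipa_output_alt
  dsimp only
  rw [pvLemA, pvLemB]
  have hBd : pvBlockDict ([] : List String) = PySem.Dict.empty := rfl
  rw [hBd]
  simp only [List.map_nil, List.nil_append]
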